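-- pv_equiv track=rewrite | github.com/djcurtin/ropper | ropper.py | contains_bad_ops
-- ===== SOURCE A (Python) =====
-- def contains_bad_ops(line):
--     bad_ops = ['call', 'leave', 'add esp, 0x', 'loop', 'loopne',
--                'jmp', 'jz', 'je', 'jnz', 'jne', 'ja', 'jae',
--                'jna', 'jnae', 'jb', 'jbe', 'jnb', 'jnbe']
--
--     for op in bad_ops:
--         if op in line:
--             return True
--
--     return False
-- ===== SOURCE B (Python) =====
-- import re
--
-- _BAD_OPS_RE = re.compile('|'.join(['call', 'leave', 'add esp, 0x', 'loop', 'loopne',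
--                                    'jmp', 'jz', 'je', 'jnz', 'jne', 'ja', 'jae',
--                                    'jna', 'jnae', 'jb', 'jbe', 'jnb', 'jnbe']))
--
-- def contains_bad_ops(line):
--     return bool(_BAD_OPS_RE.search(line))
-- ===== Notes on version B (the rewrite author's own statement) =====
-- stated objective: idiomatic
-- what changed: The explicit 18-iteration substring loop is replaced by one precompiled regex alternation of the literal opcodes; re.search makes a single left-to-right pass trying the alternatives at each position, instead of 18 independent scans of the line.
import Mathlib
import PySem

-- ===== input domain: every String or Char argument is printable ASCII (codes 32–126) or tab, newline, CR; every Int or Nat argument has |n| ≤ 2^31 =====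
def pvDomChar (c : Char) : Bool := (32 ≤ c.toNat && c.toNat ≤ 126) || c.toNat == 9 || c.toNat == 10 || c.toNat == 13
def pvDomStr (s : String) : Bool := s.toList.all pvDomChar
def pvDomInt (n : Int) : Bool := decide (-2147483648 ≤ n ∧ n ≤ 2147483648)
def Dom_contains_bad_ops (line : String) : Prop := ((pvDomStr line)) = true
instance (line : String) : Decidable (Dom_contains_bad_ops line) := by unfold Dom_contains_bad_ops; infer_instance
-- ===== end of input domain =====

-- B replaces A's 18 independent substring scans by one regex-style alternation search: a single
-- left-to-right pass trying every alternative at each position (idiomatic, same cost class).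

-- ===== PORT A =====
def pvBadOps : List String :=
  ["call", "leave", "add esp, 0x", "loop", "loopne",
   "jmp", "jz", "je", "jnz", "jne", "ja", "jae",
   "jna", "jnae", "jb", "jbe", "jnb", "jnbe"]

-- for op in bad_ops: if op in line: return True / return False
def contains_bad_ops (line : String) : Bool :=
  pvBadOps.any (fun op => PySem.Str.isIn op line)

-- ===== PORT B =====
-- the alternatives of the compiled pattern 'call|leave|…|jnbe', as character lists
def pvBadAlts : List (List Char) :=
  ["call".toList, "leave".toList, "add esp, 0x".toList, "loop".toList, "loopne".toList,
   "jmp".toList, "jz".toList, "je".toList, "jnz".toList, "jne".toList, "ja".toList, "jae".toList,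
   "jna".toList, "jnae".toList, "jb".toList, "jbe".toList, "jnb".toList, "jnbe".toList]

-- re.search: advance through the text once; at each position try the alternatives in order
def pvReSearch (pats : List (List Char)) : List Char → Bool
  | [] => pats.any (fun p => p.isPrefixOf ([] : List Char))
  | c :: t => pats.any (fun p => p.isPrefixOf (c :: t)) || pvReSearch pats t

def contains_bad_ops_alt (line : String) : Bool :=
  pvReSearch pvBadAlts line.toList

-- ===== PRECONDITION & SPEC =====
def Spec_contains_bad_ops (line : String) (out : Bool) : Prop := out = contains_bad_ops_alt line
instance (line : String) (out : Bool) : Decidable (Spec_contains_bad_ops line out) := by unfold Spec_contains_bad_ops; infer_instance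

-- ===== CLAIM (what is proved, stated in full; the proofs are below) =====
def Claim_equal_contains_bad_ops : Prop := ∀ (line : String), Dom_contains_bad_ops line → Spec_contains_bad_ops line (contains_bad_ops line)

-- ===== LEMMAS AND PROOFS =====

-- the single-pass alternation search finds exactly the patterns occurring as an infix
theorem pvReSearch_eq_true_iff (pats : List (List Char)) (s : List Char) :
    pvReSearch pats s = true ↔ ∃ p ∈ pats, p <:+: s := by
  induction s with
  | nil =>
    simp [pvReSearch, List.any_eq_true, List.isPrefixOf_iff_prefix, List.prefix_nil,
      List.infix_nil]
  | cons c t ih =>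
    simp [pvReSearch, List.any_eq_true, List.isPrefixOf_iff_prefix, ih, List.infix_cons_iff]
    constructor
    · rintro (⟨p, hp, h⟩ | ⟨p, hp, h⟩) <;> exact ⟨p, hp, by tauto⟩
    · rintro ⟨p, hp, h | h⟩
      · exact Or.inl ⟨p, hp, h⟩
      · exact Or.inr ⟨p, hp, h⟩

theorem pvBadAlts_eq : pvBadAlts = pvBadOps.map String.toList := by decide

-- ===== VERDICT (by name: the statement is the Claim_ definition above) =====
theorem contains_bad_ops_spec : Claim_equal_contains_bad_ops := by
  intro line _
  unfold Spec_contains_bad_ops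
  rw [Bool.eq_iff_iff]
  rw [contains_bad_ops_alt, pvReSearch_eq_true_iff, pvBadAlts_eq]
  simp [contains_bad_ops, List.any_eq_true, PySem.Chars.isIn_iff_infix]
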